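-- pv_equiv track=rewrite | github.com/vm910/underrail-mutagen-solver | utils.py | get_viable_start_reagents
-- ===== SOURCE A (Python) =====
-- def contains_ordered_slice(sequence: list[str], target_slice: list[str]) -> bool:
--     slice_length = len(target_slice)
--
--     for i in range(len(sequence) - slice_length + 1):
--         if sequence[i:i + slice_length] == target_slice:
--             return True
--     return False
--
-- def get_viable_start_reagents(reagents: dict, exitus: list[str]) -> dict:
--     viable_starts = []
--
--     for reagent_name, reagent_sequence in reagents.items():
--         score = 0
--         i = 1
--
--         while contains_ordered_slice(reagent_sequence, exitus[:i]):
--             score = i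
--             i += 1
--
--         if score > 0:
--             viable_starts.append((score, reagent_name, reagent_sequence))
--
--         viable_starts.sort(reverse=True, key=lambda x: x[0])
--
--     return viable_starts
-- ===== SOURCE B (Python) =====
-- def get_viable_start_reagents(reagents: dict, exitus: list[str]) -> dict:
--     viable_starts = []
--     for reagent_name, reagent_sequence in reagents.items():
--         n = len(reagent_sequence)
--         m = len(exitus)
--         best = 0
--         for j in range(n):
--             k = 0
--             while k < m and j + k < n and reagent_sequence[j + k] == exitus[k]:
--                 k += 1
--             if k > best:
--                 best = k
--         if best > 0:
--             viable_starts.append((best, reagent_name, reagent_sequence))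
--     viable_starts.sort(reverse=True, key=lambda x: x[0])
--     return viable_starts
-- ===== Notes on version B (the rewrite author's own statement) =====
-- stated objective: alternative
-- what changed: Instead of re-scanning the whole sequence with list-slice comparisons for every prefix length i and re-sorting the accumulator after every reagent, B computes each reagent's score in one pass (for each start position, the length of the longest common prefix of the sequence's tail with exitus, keeping the maximum) and sorts the result list once at the end.
import Mathlib
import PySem

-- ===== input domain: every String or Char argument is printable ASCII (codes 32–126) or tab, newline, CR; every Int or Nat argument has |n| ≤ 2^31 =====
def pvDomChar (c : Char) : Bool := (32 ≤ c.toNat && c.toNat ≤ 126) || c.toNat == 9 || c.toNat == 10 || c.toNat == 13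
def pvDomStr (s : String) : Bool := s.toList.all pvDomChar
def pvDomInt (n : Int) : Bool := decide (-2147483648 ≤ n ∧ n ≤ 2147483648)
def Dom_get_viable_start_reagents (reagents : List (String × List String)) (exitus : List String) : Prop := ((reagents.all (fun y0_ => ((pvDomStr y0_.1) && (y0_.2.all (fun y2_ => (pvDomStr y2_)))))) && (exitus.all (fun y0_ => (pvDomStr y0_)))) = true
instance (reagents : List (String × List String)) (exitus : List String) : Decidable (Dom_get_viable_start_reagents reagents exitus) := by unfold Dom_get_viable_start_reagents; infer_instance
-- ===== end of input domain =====

-- ===== PORT A =====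
-- B computes each reagent's score in one linear pass and sorts once at the end; A
-- rescans the sequence with slice comparisons per prefix length and sorts per reagent.
-- A's while loop never terminates when exitus is empty or is a contiguous sublist of a
-- reagent sequence; Pre_ excludes exactly those inputs (A returns on no input outside Pre_).
def containsOrderedSlice (sequence target : List String) : Bool :=
  (PySem.List.pyRange 0 (PySem.List.len sequence - PySem.List.len target + 1)).any
    (fun i => PySem.List.slice sequence (some i) (some (i + PySem.List.len target)) == target)

-- the 'while contains_ordered_slice(...)' loop of A; fuel only totalizes it (never
-- exhausted on inputs satisfying Pre_)
def scoreLoop (seq exitus : List String) : Int → Int → Nat → Int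
  | score, _, 0 => score
  | score, i, fuel + 1 =>
      if containsOrderedSlice seq (PySem.List.slice exitus (some 0) (some i)) then
        scoreLoop seq exitus i (i + 1) fuel
      else score

def get_viable_start_reagents (reagents : List (String × List String)) (exitus : List String) : List (Int × String × List String) :=
  reagents.foldl
    (fun viable_starts p =>
      let score := scoreLoop p.2 exitus 0 1 (exitus.length + 1)
      let vs := if score > 0 then viable_starts ++ [(score, p.1, p.2)] else viable_starts
      PySem.List.sorted vs (fun x => x.1) true)
    []

-- ===== PORT B =====
-- exact port of B's inner while loop 'while k < m and j + k < n and seq[j+k] == exitus[k]':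
-- comparing seq[j:] with exitus element by element is that loop with l = seq.drop j
def matchLen : List String → List String → Int
  | a :: as, b :: bs => if a = b then matchLen as bs + 1 else 0
  | _, _ => 0

def bestScore (seq exitus : List String) : Int :=
  (PySem.List.pyRange 0 (PySem.List.len seq)).foldl
    (fun best j =>
      let k := matchLen (seq.drop j.toNat) exitus
      if k > best then k else best) 0

def get_viable_start_reagents_alt (reagents : List (String × List String)) (exitus : List String) : List (Int × String × List String) :=
  let viable := reagents.foldl
    (fun acc p =>
      let best := bestScore p.2 exitus
      if best > 0 then acc ++ [(best, p.1, p.2)] else acc) []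
  PySem.List.sorted viable (fun x => x.1) true

-- ===== PRECONDITION & SPEC =====
-- Pre_ excludes exactly the inputs on which A DIVERGES (its while loop never exits):
-- some reagent is present while exitus is empty or occurs as a contiguous sublist of
-- that reagent's sequence.
def Pre_get_viable_start_reagents (reagents : List (String × List String)) (exitus : List String) : Prop :=
  ∀ p ∈ reagents, exitus ≠ [] ∧ ¬ exitus <:+: p.2
instance (reagents : List (String × List String)) (exitus : List String) : Decidable (Pre_get_viable_start_reagents reagents exitus) := by unfold Pre_get_viable_start_reagents; infer_instance

def pvWitness_get_viable_start_reagents : (List (String × List String)) × List String :=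
  ([("r1", ["a", "b"]), ("r2", ["c"])], ["a", "c"])

def Spec_get_viable_start_reagents (reagents : List (String × List String)) (exitus : List String) (out : List (Int × String × List String)) : Prop := out = get_viable_start_reagents_alt reagents exitus
instance (reagents : List (String × List String)) (exitus : List String) (out : List (Int × String × List String)) : Decidable (Spec_get_viable_start_reagents reagents exitus out) := by unfold Spec_get_viable_start_reagents; infer_instance

-- ===== CLAIM (what is proved, stated in full; the proofs are below) =====
def Claim_equal_get_viable_start_reagents : Prop := ∀ (reagents : List (String × List String)) (exitus : List String), Dom_get_viable_start_reagents reagents exitus → Pre_get_viable_start_reagents reagents exitus → Spec_get_viable_start_reagents reagents exitus (get_viable_start_reagents reagents exitus)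

-- ===== LEMMAS AND PROOFS =====

theorem matchLen_nonneg (l e : List String) : 0 ≤ matchLen l e := by
  induction l generalizing e with
  | nil => simp [matchLen]
  | cons a as ih =>
    cases e with
    | nil => simp [matchLen]
    | cons b bs =>
      simp only [matchLen]
      split
      · have := ih bs; omega
      · omega

theorem le_matchLen_iff (l e : List String) (i : Nat) :
    (i : Int) ≤ matchLen l e ↔ (l.take i = e.take i ∧ i ≤ l.length ∧ i ≤ e.length) := by
  induction l generalizing e i with
  | nil =>
    cases i with
    | zero => simp [matchLen_nonneg]
    | succ j => simp [matchLen]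
  | cons a as ih =>
    cases e with
    | nil =>
      cases i with
      | zero => simp [matchLen_nonneg]
      | succ j => simp [matchLen]
    | cons b bs =>
      cases i with
      | zero => simp [matchLen_nonneg]
      | succ j =>
        simp only [matchLen, List.take_succ_cons, List.length_cons]
        by_cases hab : a = b
        · subst hab
          rw [if_pos rfl]
          have ihj := ih bs j
          constructor
          · intro h
            have hj : (j : Int) ≤ matchLen as bs := by push_cast at h ⊢; omega
            obtain ⟨h1, h2, h3⟩ := ihj.mp hj
            exact ⟨by rw [h1], by omega, by omega⟩
          · rintro ⟨h1, h2, h3⟩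
            have h1' : as.take j = bs.take j := by simpa using h1
            have := ihj.mpr ⟨h1', by omega, by omega⟩
            push_cast
            omega
        · simp only [if_neg hab]
          constructor
          · intro h; exfalso; push_cast at h; have := matchLen_nonneg as bs; omega
          · rintro ⟨h1, _, _⟩
            exact absurd (by simpa using congrArg (fun l => l.head?) h1) hab

theorem le_foldl_max_iff (l : List Int) (a c : Int) :
    c ≤ l.foldl max a ↔ c ≤ a ∨ ∃ x ∈ l, c ≤ x := by
  induction l generalizing a with
  | nil => simp
  | cons b l ih =>
    simp only [List.foldl_cons, ih, le_max_iff, List.mem_cons]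
    constructor
    · rintro ((h | h) | ⟨x, hx, h⟩)
      · exact Or.inl h
      · exact Or.inr ⟨b, Or.inl rfl, h⟩
      · exact Or.inr ⟨x, Or.inr hx, h⟩
    · rintro (h | ⟨x, (rfl | hx), h⟩)
      · exact Or.inl (Or.inl h)
      · exact Or.inl (Or.inr h)
      · exact Or.inr ⟨x, hx, h⟩

theorem bestScore_eq_foldl (seq e : List String) :
    bestScore seq e = ((List.range seq.length).map (fun j => matchLen (seq.drop j) e)).foldl max 0 := by
  unfold bestScore
  rw [PySem.List.len_eq, PySem.List.pyRange_zero_natCast, List.foldl_map, List.foldl_map]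
  congr 1
  funext best j
  simp only [Int.toNat_natCast]
  split
  · next h => exact (max_eq_right (le_of_lt (by omega))).symm
  · next h => exact (max_eq_left (by omega)).symm

theorem bestScore_nonneg (seq e : List String) : 0 ≤ bestScore seq e := by
  rw [bestScore_eq_foldl]
  exact (le_foldl_max_iff _ _ _).mpr (Or.inl le_rfl)

theorem le_bestScore_iff (seq e : List String) (i : Nat) (hi : 1 ≤ i) :
    (i : Int) ≤ bestScore seq e ↔ ∃ j, j < seq.length ∧ (i : Int) ≤ matchLen (seq.drop j) e := by
  rw [bestScore_eq_foldl, le_foldl_max_iff]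
  constructor
  · rintro (h | ⟨x, hx, h⟩)
    · omega
    · obtain ⟨j, hj, rfl⟩ := List.mem_map.mp hx
      exact ⟨j, List.mem_range.mp hj, h⟩
  · rintro ⟨j, hj, h⟩
    exact Or.inr ⟨_, List.mem_map.mpr ⟨j, List.mem_range.mpr hj, rfl⟩, h⟩

theorem bestScore_lt (seq e : List String) (hinf : ¬ e <:+: seq) (he : e ≠ []) :
    bestScore seq e < (e.length : Int) := by
  by_contra hcon
  push Not at hcon
  have hl : 1 <= e.length := List.length_pos_iff.mpr he
  obtain ⟨j, hj, hm⟩ := (le_bestScore_iff seq e e.length hl).mp hcon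
  obtain ⟨ht, hle, -⟩ := (le_matchLen_iff _ _ _).mp hm
  have hpre : e <+: seq.drop j := by
    have := List.take_prefix e.length (seq.drop j)
    rwa [ht, List.take_length] at this
  exact hinf (hpre.isInfix.trans (List.drop_suffix j seq).isInfix)

theorem contains_iff (seq e : List String) (i : Nat) (h1 : 1 ≤ i) (h2 : i ≤ e.length) :
    containsOrderedSlice seq (e.take i) = true ↔ (i : Int) ≤ bestScore seq e := by
  unfold containsOrderedSlice
  have hlt : (e.take i).length = i := by simp [h2]
  rw [List.any_eq_true]
  simp only [PySem.List.len_eq, hlt, PySem.List.mem_pyRange_one, beq_iff_eq]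
  rw [le_bestScore_iff seq e i h1]
  constructor
  · rintro ⟨x, ⟨hx0, hx1⟩, hpred⟩
    have hxe : ((x.toNat : Int)) = x := Int.toNat_of_nonneg hx0
    rw [PySem.List.slice_toNat _ hx0 (by omega)] at hpred
    have hti : (x + (i : Int)).toNat - x.toNat = i := by omega
    rw [hti] at hpred
    refine ⟨x.toNat, by omega, (le_matchLen_iff _ _ _).mpr ⟨hpred, ?_, h2⟩⟩
    rw [List.length_drop]
    omega
  · rintro ⟨j, hj, hm⟩
    obtain ⟨ht, hle, -⟩ := (le_matchLen_iff _ _ _).mp hm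
    rw [List.length_drop] at hle
    refine ⟨(j : Int), ⟨by positivity, by omega⟩, ?_⟩
    rw [PySem.List.slice_toNat _ (by positivity) (by positivity)]
    have hti : ((j : Int) + (i : Int)).toNat - ((j : Int)).toNat = i := by omega
    rw [hti, Int.toNat_natCast]
    exact ht

theorem scoreLoop_eq (seq e : List String) (hB : bestScore seq e < (e.length : Int)) :
    ∀ (fuel k : Nat), 1 ≤ k → (k : Int) ≤ bestScore seq e + 1 →
      (bestScore seq e).toNat + 2 ≤ k + fuel →
      scoreLoop seq e ((k : Int) - 1) (k : Int) fuel = bestScore seq e := by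
  intro fuel
  induction fuel with
  | zero =>
    intro k hk1 hk2 hk3
    have h0 := bestScore_nonneg seq e
    omega
  | succ fuel ih =>
    intro k hk1 hk2 hk3
    have h0 := bestScore_nonneg seq e
    have hks : PySem.List.slice e (some 0) (some (k : Int)) = e.take k := by
      simp [PySem.List.slice_to_natCast]
    have hkle : k <= e.length := by omega
    simp only [scoreLoop, hks, contains_iff seq e k hk1 hkle]
    by_cases hc : (k : Int) <= bestScore seq e
    · rw [if_pos hc]
      have h := ih (k + 1) (by omega) (by push_cast; omega) (by omega)
      push_cast at h
      simpa using h
    · rw [if_neg hc]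
      omega

theorem score_eq (seq e : List String) (he : e ≠ []) (hinf : ¬ e <:+: seq) :
    scoreLoop seq e 0 1 (e.length + 1) = bestScore seq e := by
  have hB := bestScore_lt seq e hinf he
  have h0 := bestScore_nonneg seq e
  have h := scoreLoop_eq seq e hB (e.length + 1) 1 le_rfl (by push_cast; omega) (by omega)
  simpa using h

theorem sorted_rev_append (l : List (Int × String × List String)) (x : Int × String × List String) :
    PySem.List.sorted (PySem.List.sorted l (fun t => t.1) true ++ [x]) (fun t => t.1) true
      = PySem.List.sorted (l ++ [x]) (fun t => t.1) true := by
  rw [PySem.List.sorted_rev_eq_foldl_insertBy (PySem.List.sorted l (fun t => t.1) true ++ [x]),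
      PySem.List.sorted_rev_eq_foldl_insertBy (l ++ [x]),
      List.foldl_append, List.foldl_append,
      ← PySem.List.sorted_rev_eq_foldl_insertBy (PySem.List.sorted l (fun t => t.1) true),
      PySem.List.sorted_rev_sorted_rev,
      PySem.List.sorted_rev_eq_foldl_insertBy l]

theorem fold_inv (e : List String) :
    ∀ (l : List (String × List String)) (acc : List (Int × String × List String)),
      (∀ p ∈ l, e ≠ [] ∧ ¬ e <:+: p.2) →
      l.foldl
        (fun viable_starts p =>
          let score := scoreLoop p.2 e 0 1 (e.length + 1)
          let vs := if score > 0 then viable_starts ++ [(score, p.1, p.2)] else viable_starts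
          PySem.List.sorted vs (fun x => x.1) true)
        (PySem.List.sorted acc (fun x => x.1) true)
      = PySem.List.sorted
          (l.foldl
            (fun acc p =>
              let best := bestScore p.2 e
              if best > 0 then acc ++ [(best, p.1, p.2)] else acc) acc)
          (fun x => x.1) true := by
  intro l
  induction l with
  | nil => intro acc _; rfl
  | cons p l ih =>
    intro acc hall
    have hp := hall p List.mem_cons_self
    have hs := score_eq p.2 e hp.1 hp.2
    simp only [List.foldl_cons, hs]
    by_cases hb : bestScore p.2 e > 0
    · simp only [if_pos hb, sorted_rev_append]
      exact ih (acc ++ [(bestScore p.2 e, p.1, p.2)]) (fun q hq => hall q (List.mem_cons_of_mem _ hq))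
    · simp only [if_neg hb, PySem.List.sorted_rev_sorted_rev]
      exact ih acc (fun q hq => hall q (List.mem_cons_of_mem _ hq))

-- ===== VERDICT (by name: the statement is the Claim_ definition above) =====
theorem get_viable_start_reagents_spec : Claim_equal_get_viable_start_reagents := by
  intro reagents exitus _hdom hpre
  unfold Spec_get_viable_start_reagents
  unfold get_viable_start_reagents get_viable_start_reagents_alt
  have h := fold_inv exitus reagents [] hpre
  simpa using h
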